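-- pv_equiv track=rewrite | github.com/DrewPhi/manyDiffusionDistillations | manylatents/pipeline/stages/distillation_sweep.py | _expand_sweep_grid
-- ===== SOURCE A (Python) =====
-- import itertools
-- from typing import Any, Dict, List, Optional, Sequence
--
-- def _expand_sweep_grid(
--     sweep: Dict[str, Sequence[Any]],
--     tied_key_groups: Sequence[Sequence[str]] | None = None,
-- ) -> List[Dict[str, Any]]:
--     if not sweep:
--         return [{}]
--
--     groups: List[List[str]] = []
--     used_keys: set[str] = set()
--     for group in tied_key_groups or []:
--         normalized = [str(k) for k in group]
--         if not normalized:
--             continue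
--         missing = [k for k in normalized if k not in sweep]
--         if missing:
--             raise KeyError(f"sweep_tied_keys references missing sweep keys: {missing}")
--         for key in normalized:
--             if key in used_keys:
--                 raise ValueError(f"sweep key '{key}' appears in multiple tied groups")
--             used_keys.add(key)
--         lengths = []
--         for key in normalized:
--             seq = sweep[key]
--             if not isinstance(seq, Sequence) or isinstance(seq, (str, bytes)):
--                 raise TypeError(f"sweep['{key}'] must be a sequence of values")
--             if len(seq) == 0:
--                 raise ValueError(f"sweep['{key}'] is empty")
--             lengths.append(len(seq))
--         if len(set(lengths)) != 1:
--             raise ValueError(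
--                 f"All tied sweep keys must have the same length for group {normalized}: {lengths}"
--             )
--         groups.append(normalized)
--
--     for key in sweep.keys():
--         if key not in used_keys:
--             groups.append([key])
--
--     grouped_values: List[List[Dict[str, Any]]] = []
--     for group in groups:
--         if len(group) == 1:
--             key = group[0]
--             seq = sweep[key]
--             if not isinstance(seq, Sequence) or isinstance(seq, (str, bytes)):
--                 raise TypeError(f"sweep['{key}'] must be a sequence of values")
--             if len(seq) == 0:
--                 raise ValueError(f"sweep['{key}'] is empty")
--             grouped_values.append([{key: value} for value in seq])
--             continue
--
--         rows = []
--         for idx in range(len(sweep[group[0]])):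
--             rows.append({key: sweep[key][idx] for key in group})
--         grouped_values.append(rows)
--
--     combos: List[Dict[str, Any]] = []
--     for parts in itertools.product(*grouped_values):
--         merged: Dict[str, Any] = {}
--         for part in parts:
--             merged.update(part)
--         combos.append(merged)
--     return combos
-- ===== SOURCE B (Python) =====
-- from typing import Any, Dict, List, Optional, Sequence
--
-- def _expand_sweep_grid(
--     sweep: Dict[str, Sequence[Any]],
--     tied_key_groups: Sequence[Sequence[str]] | None = None,
-- ) -> List[Dict[str, Any]]:
--     if not sweep:
--         return [{}]
--
--     combos: List[Dict[str, Any]] = [{}]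
--     used_keys: set[str] = set()
--     for group in tied_key_groups or []:
--         normalized = [str(k) for k in group]
--         if not normalized:
--             continue
--         missing = [k for k in normalized if k not in sweep]
--         if missing:
--             raise KeyError(f"sweep_tied_keys references missing sweep keys: {missing}")
--         for key in normalized:
--             if key in used_keys:
--                 raise ValueError(f"sweep key '{key}' appears in multiple tied groups")
--             used_keys.add(key)
--         lengths = []
--         for key in normalized:
--             seq = sweep[key]
--             if not isinstance(seq, Sequence) or isinstance(seq, (str, bytes)):
--                 raise TypeError(f"sweep['{key}'] must be a sequence of values")
--             if len(seq) == 0: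
--                 raise ValueError(f"sweep['{key}'] is empty")
--             lengths.append(len(seq))
--         if len(set(lengths)) != 1:
--             raise ValueError(
--                 f"All tied sweep keys must have the same length for group {normalized}: {lengths}"
--             )
--         rows = [{key: sweep[key][idx] for key in normalized} for idx in range(lengths[0])]
--         combos = [{**c, **r} for c in combos for r in rows]
--
--     for key in sweep.keys():
--         if key in used_keys:
--             continue
--         seq = sweep[key]
--         if not isinstance(seq, Sequence) or isinstance(seq, (str, bytes)):
--             raise TypeError(f"sweep['{key}'] must be a sequence of values")
--         if len(seq) == 0:
--             raise ValueError(f"sweep['{key}'] is empty")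
--         combos = [{**c, key: value} for c in combos for value in seq]
--     return combos
-- ===== Notes on version B (the rewrite author's own statement) =====
-- stated objective: alternative
-- what changed: B drops the groups/grouped_values intermediate lists and itertools.product: it keeps a running list of merged combo dicts, folding each tied group's rows in during validation and then each remaining single key's values in one pass, producing the same odometer order.
import Mathlib
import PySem

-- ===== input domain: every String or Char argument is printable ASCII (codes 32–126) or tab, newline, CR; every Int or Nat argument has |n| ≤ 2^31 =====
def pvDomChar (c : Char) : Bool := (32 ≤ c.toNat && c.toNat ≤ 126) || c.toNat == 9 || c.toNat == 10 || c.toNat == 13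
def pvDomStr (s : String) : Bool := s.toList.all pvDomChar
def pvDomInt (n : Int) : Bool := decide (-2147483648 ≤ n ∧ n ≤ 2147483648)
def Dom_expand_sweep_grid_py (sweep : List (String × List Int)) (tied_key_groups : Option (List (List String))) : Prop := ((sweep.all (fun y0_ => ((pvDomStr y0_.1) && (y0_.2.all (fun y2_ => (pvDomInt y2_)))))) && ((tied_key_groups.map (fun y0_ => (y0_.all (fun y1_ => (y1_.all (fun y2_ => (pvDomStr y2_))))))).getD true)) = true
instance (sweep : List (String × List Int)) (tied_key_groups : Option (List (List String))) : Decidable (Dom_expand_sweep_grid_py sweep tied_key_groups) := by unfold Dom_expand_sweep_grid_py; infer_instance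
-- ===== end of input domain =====

-- B replaces A's grouped_values/itertools.product stage by an incremental fold that keeps a running
-- list of merged dicts (objective: alternative decomposition, same cost). Equivalence is about the
-- return value; neither program mutates its arguments.

-- ===== PORT A =====
-- sweep[k] (keys are validated before use; outside Pre_ the Python raises and the port defaults)
def pvGetSeq (sweep : List (String × List Int)) (k : String) : List Int :=
  ((PySem.Dict.ofList sweep).get? k).getD []

-- merged.update(part) : fold Python dict.update over part's items
def pvMerge (c r : PySem.Dict String Int) : PySem.Dict String Int :=
  r.items.foldl (fun d kv => d.insert kv.1 kv.2) c

-- the used-keys loop of a tied group: 'if key in used_keys: raise' / 'used_keys.add(key)'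
def pvAddUsed : PySem.Set String → List String → Option (PySem.Set String)
  | used, [] => some used
  | used, key :: ks =>
    if PySem.Set.contains used key then none else pvAddUsed (PySem.Set.add used key) ks

-- the lengths loop of a tied group ('if len(seq) == 0: raise' ; the isinstance checks cannot
-- fail on values typed List Int and have no residue in the port)
def pvLengths (sweep : List (String × List Int)) : List String → Option (List Int)
  | [] => some []
  | key :: ks =>
    let seq := pvGetSeq sweep key
    if seq.length = 0 then none
    else match pvLengths sweep ks with
      | none => none
      | some ls => some ((seq.length : Int) :: ls)

-- the body of A's first loop for one non-empty tied group (none = the raise branches)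
def pvCheckGroup (sweep : List (String × List Int)) (g : List String)
    (used : PySem.Set String) : Option (PySem.Set String) :=
  let missing := g.filter (fun k => !((PySem.Dict.ofList sweep).contains k))
  if missing ≠ [] then none
  else match pvAddUsed used g with
    | none => none
    | some used' =>
      match pvLengths sweep g with
      | none => none
      | some lengths =>
        if (PySem.Set.ofList lengths).length ≠ 1 then none else some used'

-- A's first loop: collect validated tied groups (str(k) is the identity on String keys)
def pvATied (sweep : List (String × List Int)) :
    List (List String) → List (List String) → PySem.Set String →
    Option (List (List String) × PySem.Set String)
  | [], groups, used => some (groups, used)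
  | g :: rest, groups, used =>
    if g = [] then pvATied sweep rest groups used
    else match pvCheckGroup sweep g used with
      | none => none
      | some used' => pvATied sweep rest (groups ++ [g]) used'

-- rows of a tied group: [{key: sweep[key][idx] for key in group} for idx in range(len(sweep[group[0]]))]
def pvTiedRows (sweep : List (String × List Int)) (g : List String) : List (PySem.Dict String Int) :=
  (PySem.List.pyRange 0 ((pvGetSeq sweep (g.headD "")).length : Int) 1).map
    (fun idx => g.foldl (fun d key => d.insert key (PySem.List.pyGetD (pvGetSeq sweep key) idx 0))
      (PySem.Dict.ofList []))

-- A's second-stage loop building grouped_values (none = the single-key raise branches)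
def pvAGrouped (sweep : List (String × List Int)) :
    List (List String) → Option (List (List (PySem.Dict String Int)))
  | [] => some []
  | g :: rest =>
    if g.length = 1 then
      let key := g.headD ""
      let seq := pvGetSeq sweep key
      if seq.length = 0 then none
      else match pvAGrouped sweep rest with
        | none => none
        | some gvs => some ((seq.map (fun v => PySem.Dict.ofList [(key, v)])) :: gvs)
    else
      match pvAGrouped sweep rest with
      | none => none
      | some gvs => some (pvTiedRows sweep g :: gvs)

-- itertools.product(*grouped_values): leftmost factor varies slowest
def pvProduct : List (List (PySem.Dict String Int)) → List (List (PySem.Dict String Int))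
  | [] => [[]]
  | g :: gs => g.flatMap (fun x => (pvProduct gs).map (fun p => x :: p))

def expand_sweep_grid_py (sweep : List (String × List Int)) (tied_key_groups : Option (List (List String))) : List (List (String × Int)) :=
  if sweep = [] then [[]]
  else
    match pvATied sweep (tied_key_groups.getD []) [] PySem.Set.empty with
    | none => []
    | some (groups0, used) =>
      -- for key in sweep.keys(): if key not in used_keys: groups.append([key])
      let groups := (PySem.Dict.ofList sweep).keys.foldl
        (fun gs k => if PySem.Set.contains used k then gs else gs ++ [[k]]) groups0
      match pvAGrouped sweep groups with
      | none => []
      | some gvs =>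
        ((pvProduct gvs).map (fun parts => (parts.foldl pvMerge (PySem.Dict.ofList [])).items))

-- ===== PORT B =====
-- combos = [{**c, **r} for c in combos for r in rows]
def pvStep (combos rows : List (PySem.Dict String Int)) : List (PySem.Dict String Int) :=
  combos.flatMap (fun c => rows.map (fun r => pvMerge c r))

-- B's fused first loop: validate each tied group exactly as A does, then immediately fold its
-- rows into the running combo list
def pvBTied (sweep : List (String × List Int)) :
    List (List String) → List (PySem.Dict String Int) → PySem.Set String →
    Option (List (PySem.Dict String Int) × PySem.Set String)
  | [], combos, used => some (combos, used)
  | g :: rest, combos, used =>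
    if g = [] then pvBTied sweep rest combos used
    else match pvCheckGroup sweep g used with
      | none => none
      | some used' => pvBTied sweep rest (pvStep combos (pvTiedRows sweep g)) used'

def expand_sweep_grid_py_alt (sweep : List (String × List Int)) (tied_key_groups : Option (List (List String))) : List (List (String × Int)) :=
  if sweep = [] then [[]]
  else
    match pvBTied sweep (tied_key_groups.getD []) [PySem.Dict.ofList []] PySem.Set.empty with
    | none => []
    | some (combos0, used) =>
      -- for key in sweep.keys(): skip used; combos = [{**c, key: v} for c in combos for v in seq]
      let res := (PySem.Dict.ofList sweep).keys.foldl
        (fun acc key =>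
          match acc with
          | none => none
          | some combos =>
            if PySem.Set.contains used key then some combos
            else
              let seq := pvGetSeq sweep key
              if seq.length = 0 then none
              else some (combos.flatMap (fun c => seq.map (fun v => c.insert key v))))
        (some combos0)
      match res with
      | none => []
      | some combos => combos.map (·.items)

-- ===== PRECONDITION & SPEC =====
-- Both ports encode every Python raise as the out-of-band result [] and are provably equal even
-- there, so the equivalence proof below holds without using Pre_; Pre_'s role is to keep the
-- claim about inputs where the Pythons actually return.
-- Pre_ excludes exactly (a) the inputs on which the Python A raises (a tied key missing from sweep,
-- a key in two tied groups or twice in one, an empty value list while sweep is non-empty, unequal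
-- lengths inside a tied group) and (b) association lists with duplicate keys, which a Python dict
-- argument cannot represent.
def Pre_expand_sweep_grid_py (sweep : List (String × List Int)) (tied_key_groups : Option (List (List String))) : Prop :=
  sweep = [] ∨
  ((sweep.map Prod.fst).Nodup ∧
   (∀ p ∈ sweep, p.2 ≠ ([] : List Int)) ∧
   (∀ g ∈ tied_key_groups.getD [], ∀ k ∈ g, k ∈ sweep.map Prod.fst) ∧
   (tied_key_groups.getD []).flatten.Nodup ∧
   (∀ g ∈ tied_key_groups.getD [], ∀ k₁ ∈ g, ∀ k₂ ∈ g,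
     (((PySem.Dict.ofList sweep).get? k₁).getD []).length =
       (((PySem.Dict.ofList sweep).get? k₂).getD []).length))
instance (sweep : List (String × List Int)) (tied_key_groups : Option (List (List String))) : Decidable (Pre_expand_sweep_grid_py sweep tied_key_groups) := by unfold Pre_expand_sweep_grid_py; infer_instance

def pvWitness_expand_sweep_grid_py : (List (String × List Int)) × Option (List (List String)) :=
  ([("a", [1, 2]), ("b", [3, 4]), ("c", [5])], some [["a", "b"]])

def Spec_expand_sweep_grid_py (sweep : List (String × List Int)) (tied_key_groups : Option (List (List String))) (out : List (List (String × Int))) : Prop := out = expand_sweep_grid_py_alt sweep tied_key_groups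
instance (sweep : List (String × List Int)) (tied_key_groups : Option (List (List String))) (out : List (List (String × Int))) : Decidable (Spec_expand_sweep_grid_py sweep tied_key_groups out) := by unfold Spec_expand_sweep_grid_py; infer_instance

-- ===== CLAIM (what is proved, stated in full; the proofs are below) =====
def Claim_equal_expand_sweep_grid_py : Prop := ∀ (sweep : List (String × List Int)) (tied_key_groups : Option (List (List String))), Dom_expand_sweep_grid_py sweep tied_key_groups → Pre_expand_sweep_grid_py sweep tied_key_groups → Spec_expand_sweep_grid_py sweep tied_key_groups (expand_sweep_grid_py sweep tied_key_groups)

-- ===== LEMMAS AND PROOFS =====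

-- A's materialised product-then-merge equals B's incremental fold of merges
theorem pvProduct_foldl (gvs : List (List (PySem.Dict String Int)))
    (acc : List (PySem.Dict String Int)) :
    acc.flatMap (fun c => (pvProduct gvs).map (fun p => p.foldl pvMerge c)) =
      gvs.foldl pvStep acc := by
  induction gvs generalizing acc with
  | nil => simp [pvProduct]
  | cons g gs ih =>
    rw [List.foldl_cons, ← ih]
    simp [pvProduct, pvStep, List.map_flatMap, List.flatMap_map, List.flatMap_assoc,
      Function.comp_def]

-- pvATied only appends to its groups accumulator
theorem pvATied_acc (sweep : List (String × List Int)) (ts : List (List String))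
    (groups : List (List String)) (used : PySem.Set String) :
    pvATied sweep ts groups used =
      (pvATied sweep ts [] used).map (fun r => (groups ++ r.1, r.2)) := by
  induction ts generalizing groups used with
  | nil => simp [pvATied]
  | cons g rest ih =>
    by_cases hg : g = []
    · simp only [pvATied, if_pos hg]; exact ih groups used
    · simp only [pvATied, if_neg hg]
      cases h : pvCheckGroup sweep g used with
      | none => simp
      | some used' =>
        simp only
        rw [ih, List.nil_append, ih (groups := [g])]
        cases pvATied sweep rest [] used' <;> simp

-- B's fused tied loop = A's tied loop followed by folding each validated group's rows
theorem pvBTied_eq (sweep : List (String × List Int)) (ts : List (List String))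
    (combos : List (PySem.Dict String Int)) (used : PySem.Set String) :
    pvBTied sweep ts combos used =
      (pvATied sweep ts [] used).map
        (fun r => (r.1.foldl (fun cs g => pvStep cs (pvTiedRows sweep g)) combos, r.2)) := by
  induction ts generalizing combos used with
  | nil => simp [pvATied, pvBTied]
  | cons g rest ih =>
    by_cases hg : g = []
    · simp only [pvATied, pvBTied, if_pos hg]; exact ih combos used
    · simp only [pvATied, pvBTied, if_neg hg]
      cases h : pvCheckGroup sweep g used with
      | none => simp
      | some used' =>
        simp only
        rw [ih, List.nil_append, pvATied_acc sweep rest [g] used']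
        cases pvATied sweep rest [] used' <;> simp

-- a validated lengths loop means every value list of the group is non-empty
theorem pvLengths_sound (sweep : List (String × List Int)) (g : List String)
    (ls : List Int) (h : pvLengths sweep g = some ls) :
    ∀ k ∈ g, (pvGetSeq sweep k).length ≠ 0 := by
  induction g generalizing ls with
  | nil => simp
  | cons key ks ih =>
    simp only [pvLengths] at h
    split_ifs at h with h0
    cases hrec : pvLengths sweep ks with
    | none => rw [hrec] at h; simp at h
    | some ls' =>
      intro k hk
      rcases List.mem_cons.mp hk with rfl | hk'
      · exact h0
      · exact ih ls' hrec k hk'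

theorem pvCheckGroup_sound (sweep : List (String × List Int)) (g : List String)
    (used used' : PySem.Set String) (h : pvCheckGroup sweep g used = some used') :
    ∀ k ∈ g, (pvGetSeq sweep k).length ≠ 0 := by
  simp only [pvCheckGroup] at h
  split at h
  · simp at h
  · split at h
    · simp at h
    · split at h
      · simp at h
      · next ls heq =>
        split at h
        · simp at h
        · exact pvLengths_sound sweep g ls heq

-- groups accepted by A's first loop are non-empty with non-empty value lists
theorem pvATied_sound (sweep : List (String × List Int)) (ts : List (List String))
    (groups gs : List (List String)) (used u : PySem.Set String)
    (h : pvATied sweep ts groups used = some (gs, u))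
    (hg : ∀ g ∈ groups, g ≠ [] ∧ ∀ k ∈ g, (pvGetSeq sweep k).length ≠ 0) :
    ∀ g ∈ gs, g ≠ [] ∧ ∀ k ∈ g, (pvGetSeq sweep k).length ≠ 0 := by
  induction ts generalizing groups used with
  | nil =>
    simp only [pvATied, Option.some_inj, Prod.mk.injEq] at h
    obtain ⟨rfl, rfl⟩ := h
    exact hg
  | cons g rest ih =>
    by_cases hgn : g = []
    · rw [pvATied, if_pos hgn] at h
      exact ih groups used h hg
    · rw [pvATied, if_neg hgn] at h
      cases hc : pvCheckGroup sweep g used with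
      | none => rw [hc] at h; simp at h
      | some used' =>
        rw [hc] at h
        refine ih (groups ++ [g]) used' h ?_
        intro g' hg'
        rcases List.mem_append.mp hg' with hin | hin
        · exact hg g' hin
        · rcases List.mem_singleton.mp hin with rfl
          exact ⟨hgn, pvCheckGroup_sound sweep g' used used' hc⟩

theorem dict_insert_empty (k : String) (v : Int) :
    (PySem.Dict.ofList ([] : List (String × Int))).insert k v = PySem.Dict.ofList [(k, v)] := by
  simp [PySem.Dict.ofList, PySem.Dict.insert, PySem.Dict.empty, PySem.Dict.contains,
    PySem.Dict.update]

theorem pvMerge_single (c : PySem.Dict String Int) (k : String) (v : Int) :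
    pvMerge c (PySem.Dict.ofList [(k, v)]) = c.insert k v := by
  simp [pvMerge, PySem.Dict.ofList, PySem.Dict.empty, PySem.Dict.insert, PySem.Dict.update,
    PySem.Dict.contains]

-- a singleton group's rows, written as A's single-key comprehension
theorem pvTiedRows_singleton (sweep : List (String × List Int)) (k : String) :
    pvTiedRows sweep [k] =
      (pvGetSeq sweep k).map (fun v => PySem.Dict.ofList [(k, v)]) := by
  calc pvTiedRows sweep [k]
      = ((PySem.List.pyRange 0 ((pvGetSeq sweep k).length : Int) 1).map
          (fun idx => PySem.List.pyGetD (pvGetSeq sweep k) idx 0)).map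
          (fun v => PySem.Dict.ofList [(k, v)]) := by
        simp [pvTiedRows, List.map_map, Function.comp_def, dict_insert_empty]
    _ = _ := by rw [PySem.List.map_pyGetD_pyRange_zero']

-- A's grouped_values stage never fails on validated tied groups and yields pvTiedRows
theorem pvAGrouped_tied (sweep : List (String × List Int)) (gs : List (List String))
    (hg : ∀ g ∈ gs, g ≠ [] ∧ ∀ k ∈ g, (pvGetSeq sweep k).length ≠ 0) :
    pvAGrouped sweep gs = some (gs.map (pvTiedRows sweep)) := by
  induction gs with
  | nil => rfl
  | cons g rest ih =>
    have ihrest := ih (fun g' h' => hg g' (List.mem_cons_of_mem _ h'))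
    by_cases h1 : g.length = 1
    · obtain ⟨k, rfl⟩ : ∃ k, g = [k] := List.length_eq_one_iff.mp h1
      have hne := (hg [k] (List.mem_cons_self ..)).2 k (by simp)
      simp only [pvAGrouped, if_pos h1, List.headD]
      rw [if_neg hne, ihrest]
      simp [pvTiedRows_singleton]
    · simp only [pvAGrouped, if_neg h1]
      rw [ihrest]
      simp

-- pvAGrouped splits over append once the prefix succeeds
theorem pvAGrouped_append (sweep : List (String × List Int)) (xs ys : List (List String))
    (a : List (List (PySem.Dict String Int))) (h : pvAGrouped sweep xs = some a) :
    pvAGrouped sweep (xs ++ ys) = (pvAGrouped sweep ys).map (a ++ ·) := by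
  induction xs generalizing a with
  | nil =>
    simp only [pvAGrouped, Option.some_inj] at h
    subst h
    simp [Option.map_id']
  | cons g rest ih =>
    simp only [pvAGrouped, List.cons_append] at h ⊢
    by_cases h1 : g.length = 1
    · rw [if_pos h1] at h ⊢
      by_cases h2 : (pvGetSeq sweep (g.headD "")).length = 0
      · rw [if_pos h2] at h; simp at h
      · rw [if_neg h2] at h ⊢
        cases hrec : pvAGrouped sweep rest with
        | none => rw [hrec] at h; simp at h
        | some b =>
          rw [hrec] at h
          simp only [Option.some_inj] at h
          subst h
          rw [ih b hrec]
          cases pvAGrouped sweep ys <;> simp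
    · rw [if_neg h1] at h ⊢
      cases hrec : pvAGrouped sweep rest with
      | none => rw [hrec] at h; simp at h
      | some b =>
        rw [hrec] at h
        simp only [Option.some_inj] at h
        subst h
        rw [ih b hrec]
        cases pvAGrouped sweep ys <;> simp

-- B's single-key fold stays failed once a raise has been recorded
theorem pvSinglesFold_none (sweep : List (String × List Int)) (used : PySem.Set String)
    (keys : List String) :
    keys.foldl
      (fun (acc : Option (List (PySem.Dict String Int))) key =>
        match acc with
        | none => none
        | some cs =>
          if PySem.Set.contains used key then some cs
          else
            let seq := pvGetSeq sweep key
            if seq.length = 0 then none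
            else some (cs.flatMap (fun c => seq.map (fun v => c.insert key v))))
      none = none := by
  induction keys with
  | nil => rfl
  | cons k ks ih => simpa using ih

-- B's single-key fold = A's grouped_values over the remaining singleton groups, folded
theorem pvSingles_eq (sweep : List (String × List Int)) (used : PySem.Set String)
    (keys : List String) (combos : List (PySem.Dict String Int)) :
    keys.foldl
      (fun (acc : Option (List (PySem.Dict String Int))) key =>
        match acc with
        | none => none
        | some cs =>
          if PySem.Set.contains used key then some cs
          else
            let seq := pvGetSeq sweep key
            if seq.length = 0 then none
            else some (cs.flatMap (fun c => seq.map (fun v => c.insert key v))))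
      (some combos) =
      (pvAGrouped sweep ((keys.filter (fun k => !(PySem.Set.contains used k))).map (fun k => [k]))).map
        (fun gvs => gvs.foldl pvStep combos) := by
  induction keys generalizing combos with
  | nil => rfl
  | cons key ks ih =>
    rw [List.foldl_cons, List.filter_cons]
    by_cases hu : PySem.Set.contains used key
    · simp only [hu, Bool.not_true, Bool.false_eq_true, if_false, if_true]
      exact ih combos
    · simp only [hu, Bool.not_false, if_true, List.map_cons]
      by_cases h0 : (pvGetSeq sweep key).length = 0
      · simp only [h0, Bool.false_eq_true, if_false, if_true]
        rw [pvSinglesFold_none]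
        simp [pvAGrouped, h0]
      · simp only [h0, Bool.false_eq_true, if_false]
        rw [ih]
        simp only [pvAGrouped, List.length_cons, List.length_nil, List.headD]
        rw [if_neg h0]
        cases pvAGrouped sweep ((ks.filter fun k => !PySem.Set.contains used k).map fun k => [k]) with
        | none => simp
        | some gvs =>
          simp only [Option.map_some]
          congr 1
          simp [pvStep, Function.comp_def, pvMerge_single]

-- ===== VERDICT (by name: the statement is the Claim_ definition above) =====
theorem expand_sweep_grid_py_spec : Claim_equal_expand_sweep_grid_py := by
  unfold Claim_equal_expand_sweep_grid_py Spec_expand_sweep_grid_py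
  intro sweep tied _ _
  unfold expand_sweep_grid_py expand_sweep_grid_py_alt
  by_cases hs : sweep = []
  · rw [if_pos hs, if_pos hs]
  · rw [if_neg hs, if_neg hs, pvBTied_eq]
    cases hA : pvATied sweep (tied.getD []) [] PySem.Set.empty with
    | none => simp
    | some r =>
      obtain ⟨gtied, used⟩ := r
      simp only [Option.map_some]
      have hfun : (fun (gs : List (List String)) k =>
          if PySem.Set.contains used k then gs else gs ++ [[k]]) =
          (fun gs k => if (!PySem.Set.contains used k) = true then gs ++ [[k]] else gs) := by
        funext gs k
        cases PySem.Set.contains used k <;> simp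
      have hkeys : ((PySem.Dict.ofList sweep).keys.foldl
          (fun gs k => if PySem.Set.contains used k then gs else gs ++ [[k]]) gtied)
          = gtied ++ (((PySem.Dict.ofList sweep).keys.filter
              (fun k => !(PySem.Set.contains used k))).map (fun k => [k])) := by
        rw [hfun, PySem.List.foldl_append_if]
      have hsound := pvATied_sound sweep (tied.getD []) [] gtied PySem.Set.empty used hA (by simp)
      have hAg := pvAGrouped_tied sweep gtied hsound
      rw [hkeys, pvAGrouped_append sweep _ _ _ hAg, pvSingles_eq]
      cases pvAGrouped sweep
          (((PySem.Dict.ofList sweep).keys.filter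
            (fun k => !(PySem.Set.contains used k))).map (fun k => [k])) with
      | none => simp
      | some gvs2 =>
        simp only [Option.map_some]
        have base : ∀ (gvs : List (List (PySem.Dict String Int))) (e : PySem.Dict String Int),
            (pvProduct gvs).map (fun parts => parts.foldl pvMerge e) = gvs.foldl pvStep [e] := by
          intro gvs e
          simpa using pvProduct_foldl gvs [e]
        rw [show (gtied.foldl (fun cs g => pvStep cs (pvTiedRows sweep g)) [PySem.Dict.ofList []])
              = (gtied.map (pvTiedRows sweep)).foldl pvStep [PySem.Dict.ofList []]
            from List.foldl_map.symm,
          ← List.foldl_append, ← base, List.map_map]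
        simp [Function.comp_def]
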